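-- pv_equiv track=rewrite | github.com/IcySleepingStar/Python | Inclassable/Rand0-99 et formes creuses.py | nonpresent
-- ===== SOURCE A (Python) =====
-- def nonpresent(t):
--     i = 0
--     k = 0
--     while i < 100:
--         if i in t:
--             k += 1
--         i += 1
--     n = 100 - k
--     return n
-- ===== SOURCE B (Python) =====
-- def nonpresent(t):
--     seen = [False] * 100
--     for x in t:
--         if 0 <= x < 100:
--             seen[x] = True
--     return seen.count(False)
-- ===== Notes on version B (the rewrite author's own statement) =====
-- stated objective: faster
-- what changed: Instead of scanning 0..99 and testing each with 'in t' (a linear scan of t per candidate), B makes one pass over t marking a 100-slot boolean table and returns the count of unmarked slots.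
import Mathlib
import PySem

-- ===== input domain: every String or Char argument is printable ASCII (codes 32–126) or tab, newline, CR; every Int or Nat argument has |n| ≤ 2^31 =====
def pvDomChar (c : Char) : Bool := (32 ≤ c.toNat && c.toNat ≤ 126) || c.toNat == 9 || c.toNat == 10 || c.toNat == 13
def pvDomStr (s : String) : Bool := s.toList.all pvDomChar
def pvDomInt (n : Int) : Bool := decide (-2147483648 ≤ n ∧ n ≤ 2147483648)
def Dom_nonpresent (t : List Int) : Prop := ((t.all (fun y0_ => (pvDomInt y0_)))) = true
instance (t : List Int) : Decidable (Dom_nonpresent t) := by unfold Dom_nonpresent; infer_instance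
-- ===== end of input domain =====

-- B replaces A's scan of 0..99 with 'i in t' tests by one pass over t marking a 100-slot table, then counts unmarked slots (objective: faster).

-- ===== PORT A =====
-- while i < 100: if i in t: k += 1 — ported as a fold over range(0,100); then return 100 - k
def nonpresent (t : List Int) : Int :=
  let k := (PySem.List.pyRange 0 100 1).foldl (fun k i => if t.contains i then k + 1 else k) 0
  100 - k

-- ===== PORT B =====
-- seen = [False]*100; for x in t: if 0 <= x < 100: seen[x] = True; return seen.count(False)
def nonpresent_alt (t : List Int) : Int :=
  let seen := t.foldl (fun s x => if 0 ≤ x ∧ x < 100 then s.set x.toNat true else s)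
                      (List.replicate 100 false)
  ((seen.countP (fun b => b == false) : Nat) : Int)

-- ===== PRECONDITION & SPEC =====
def Spec_nonpresent (t : List Int) (out : Int) : Prop := out = nonpresent_alt t
instance (t : List Int) (out : Int) : Decidable (Spec_nonpresent t out) := by unfold Spec_nonpresent; infer_instance

-- ===== CLAIM (what is proved, stated in full; the proofs are below) =====
def Claim_equal_nonpresent : Prop := ∀ (t : List Int), Dom_nonpresent t → Spec_nonpresent t (nonpresent t)

-- ===== LEMMAS AND PROOFS =====

-- A's counting fold is countP
theorem pv_foldl_count (t : List Int) (r : List Int) (n : Int) :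
    r.foldl (fun k i => if t.contains i then k + 1 else k) n
      = n + ((r.countP (fun i => t.contains i) : Nat) : Int) := by
  induction r generalizing n with
  | nil => simp
  | cons x xs ih =>
    simp only [List.foldl_cons, List.countP_cons, ih]
    by_cases h : x ∈ t
    · simp [h]; omega
    · simp [h]

-- countP of a predicate and its negation partition the length
theorem pv_countP_split (p : Int → Bool) (r : List Int) :
    r.countP p + r.countP (fun x => !p x) = r.length := by
  induction r with
  | nil => simp
  | cons x xs ih => by_cases h : p x = true <;> simp [h] <;> omega

-- setting slot k of a range-indexed table
theorem pv_set_map_range (f : Nat → Bool) (k : Nat) :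
    ((List.range 100).map f).set k true
      = (List.range 100).map (fun j => if j = k then true else f j) := by
  apply List.ext_getElem
  · simp
  · intro i h1 h2
    simp only [List.getElem_set, List.getElem_map, List.getElem_range]
    by_cases hik : k = i
    · simp [hik]
    · simp [hik, Ne.symm hik]

-- invariant of B's marking fold
theorem pv_mark_fold (t : List Int) (f : Nat → Bool) :
    t.foldl (fun s x => if 0 ≤ x ∧ x < 100 then s.set x.toNat true else s)
        ((List.range 100).map f)
      = (List.range 100).map (fun j => f j || t.contains (j : Int)) := by
  induction t generalizing f with
  | nil => simp
  | cons x xs ih =>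
    simp only [List.foldl_cons]
    by_cases h : 0 ≤ x ∧ x < 100
    · rw [if_pos h, pv_set_map_range f x.toNat, ih]
      apply List.map_congr_left
      intro j hj
      simp at hj
      by_cases hjx : (j : Int) = x
      · subst hjx
        simp
      · have : j ≠ x.toNat := by omega
        simp [this, hjx]
    · rw [if_neg h, ih]
      apply List.map_congr_left
      intro j hj
      simp at hj
      have : (j : Int) ≠ x := by omega
      simp [this]

-- ===== VERDICT (by name: the statement is the Claim_ definition above) =====
set_option maxRecDepth 8192 in
theorem nonpresent_spec : Claim_equal_nonpresent := by
  intro t _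
  unfold Spec_nonpresent nonpresent nonpresent_alt
  dsimp only
  rw [pv_foldl_count]
  have hrepl : (List.replicate 100 false) = (List.range 100).map (fun _ => false) := by
    simp
  rw [hrepl, pv_mark_fold, List.countP_map]
  have hb : (List.range 100).countP ((fun b => b == false) ∘ fun (j : Nat) => false || t.contains ((j : Nat) : Int))
      = (List.range 100).countP (fun (j : Nat) => !(fun (j : Nat) => t.contains ((j : Nat) : Int)) j) := by
    apply List.countP_congr
    intro j _
    cases h : t.contains (j : Int) <;> simp
  rw [hb]
  have ha : (PySem.List.pyRange 0 100 1).countP (fun i => t.contains i)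
      = (List.range 100).countP (fun j => t.contains ((j : Nat) : Int)) := by
    have : PySem.List.pyRange 0 100 1 = (List.range 100).map (fun j => ((j : Nat) : Int)) := by
      decide
    rw [this, List.countP_map]
    rfl
  rw [ha]
  have hsplit := pv_countP_split (fun i => t.contains i) ((List.range 100).map (fun j => ((j : Nat) : Int)))
  rw [List.countP_map, List.countP_map] at hsplit
  simp only [List.length_map, List.length_range] at hsplit
  have h1 : (List.range 100).countP ((fun i => t.contains i) ∘ fun j => ((j : Nat) : Int))
      = (List.range 100).countP (fun j => t.contains ((j : Nat) : Int)) := rfl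
  have h2 : (List.range 100).countP ((fun x => !(fun i => t.contains i) x) ∘ fun j => ((j : Nat) : Int))
      = (List.range 100).countP (fun j => !(fun j => t.contains ((j : Nat) : Int)) j) := rfl
  rw [h1, h2] at hsplit
  omega
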